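-- pv_equiv track=rewrite | github.com/trif2/EZ-Compiler | code_analysis.py | get_token_from_ID
-- ===== SOURCE A (Python) =====
-- KEYWORDS = [
--     "def",
--     "fed",
--     "int",
--     "double",
--     "if",
--     "fi",
--     "else",
--     "then",
--     "while",
--     "do",
--     "od",
--     "print",
--     "return",
--     "or",
--     "and",
--     "not"
-- ]
--
-- def get_token_from_ID(state, lexeme):
--     if state == 1: # Identifier, but check for keyword
--         n = len(KEYWORDS)
--         for i in range(n):
--             if lexeme == KEYWORDS[i]: # if lexeme is a keyword
--                 return lexeme
--         return "iden"
--     elif state == 2: # iden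
--         return "iden"
--     elif state == 3 or state == 6: # int
--         return "RINT"
--     elif state == 7 or state == 10: # double
--         return "RDBL"
--     elif state == 14: # =
--         return "="
--     elif state >= 11 and state <= 17: # relop
--         return "RELOP"
--     elif state == 18: # op
--         return "OP1"
--     elif state == 19: # (
--         return "OP2"
--     elif state == 20: # )
--         return "("
--     elif state == 21: # ;
--         return ")"
--     elif state == 22: # ;
--         return "["
--     elif state == 23: # ;
--         return "]"
--     elif state == 24: # ,
--         return ","
--     elif state == 25: # .
--         return "."
--     elif state == 26: # ;
--         return ";"
--     return "" # curr_state is delim state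
-- ===== SOURCE B (Python) =====
-- KEYWORDS = [
--     "def", "fed", "int", "double", "if", "fi", "else", "then",
--     "while", "do", "od", "print", "return", "or", "and", "not",
-- ]
--
-- # states in sorted order, with their tokens in a parallel array
-- _STATES = [2, 3, 6, 7, 10, 11, 12, 13, 14, 15, 16, 17, 18, 19, 20, 21, 22, 23, 24, 25, 26]
-- _TOKENS = ["iden", "RINT", "RINT", "RDBL", "RDBL", "RELOP", "RELOP", "RELOP", "=",
--            "RELOP", "RELOP", "RELOP", "OP1", "OP2", "(", ")", "[", "]", ",", ".", ";"]
--
-- def _bsearch(lo, hi, state):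
--     """Recursive binary search for state in _STATES[lo:hi]; -1 if absent."""
--     if lo >= hi:
--         return -1
--     mid = (lo + hi) // 2
--     if _STATES[mid] == state:
--         return mid
--     if _STATES[mid] < state:
--         return _bsearch(mid + 1, hi, state)
--     return _bsearch(lo, mid, state)
--
-- def get_token_from_ID(state, lexeme):
--     if state == 1:
--         return lexeme if lexeme in KEYWORDS else "iden"
--     i = _bsearch(0, len(_STATES), state)
--     return _TOKENS[i] if i >= 0 else ""
-- ===== Notes on version B (the rewrite author's own statement) =====
-- stated objective: alternative
-- what changed: Replaced A's 15-branch if/elif chain and indexed linear keyword scan with a recursive binary search over a sorted state array paired with a parallel token array (keyword check by plain membership).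
import Mathlib
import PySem

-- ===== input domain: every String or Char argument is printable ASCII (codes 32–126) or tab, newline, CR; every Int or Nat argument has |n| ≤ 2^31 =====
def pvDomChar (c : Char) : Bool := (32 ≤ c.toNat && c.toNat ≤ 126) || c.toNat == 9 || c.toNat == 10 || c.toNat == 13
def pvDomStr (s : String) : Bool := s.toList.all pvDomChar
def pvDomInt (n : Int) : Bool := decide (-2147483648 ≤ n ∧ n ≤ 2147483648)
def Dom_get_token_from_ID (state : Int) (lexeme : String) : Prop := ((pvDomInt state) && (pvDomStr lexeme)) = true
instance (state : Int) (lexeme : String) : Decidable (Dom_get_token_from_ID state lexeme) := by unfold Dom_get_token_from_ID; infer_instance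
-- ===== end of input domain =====

-- B replaces A's if/elif branch chain and indexed linear keyword scan with a recursive
-- binary search over a sorted state array and a parallel token array (alternative algorithm).

-- ===== PORT A =====
def KEYWORDS : List String :=
  ["def", "fed", "int", "double", "if", "fi", "else", "then",
   "while", "do", "od", "print", "return", "or", "and", "not"]

-- A's 'for i in range(n): if lexeme == KEYWORDS[i]: return lexeme' / 'return "iden"'
def kwScan (lexeme : String) : List String → String
  | [] => "iden"
  | k :: rest => if lexeme == k then lexeme else kwScan lexeme rest

def get_token_from_ID (state : Int) (lexeme : String) : String :=
  if state == 1 then kwScan lexeme KEYWORDS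
  else if state == 2 then "iden"
  else if state == 3 || state == 6 then "RINT"
  else if state == 7 || state == 10 then "RDBL"
  else if state == 14 then "="
  else if state ≥ 11 && state ≤ 17 then "RELOP"
  else if state == 18 then "OP1"
  else if state == 19 then "OP2"
  else if state == 20 then "("
  else if state == 21 then ")"
  else if state == 22 then "["
  else if state == 23 then "]"
  else if state == 24 then ","
  else if state == 25 then "."
  else if state == 26 then ";"
  else ""

-- ===== PORT B =====
def STATES : List Int := [2, 3, 6, 7, 10, 11, 12, 13, 14, 15, 16, 17, 18, 19, 20, 21, 22, 23, 24, 25, 26]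
def TOKS : List String := ["iden", "RINT", "RINT", "RDBL", "RDBL", "RELOP", "RELOP", "RELOP", "=",
                           "RELOP", "RELOP", "RELOP", "OP1", "OP2", "(", ")", "[", "]", ",", ".", ";"]

-- Source B's recursive `_bsearch`; the fuel argument only bounds the recursion depth (the Python
-- recursion always terminates; fuel = len(STATES)+1 is more than the depth ever reached).
-- _STATES[mid] is ported as pyGetD with default 0: mid is always a valid index when lo < hi
-- with 0 ≤ lo and hi ≤ len, so this is exact.
def bsearch : Nat → Int → Int → Int → Int
  | 0, _, _, _ => -1
  | fuel + 1, lo, hi, state =>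
    if lo ≥ hi then -1
    else
      let mid := PySem.Int.floordiv (lo + hi) 2
      let e := PySem.List.pyGetD STATES mid 0
      if e == state then mid
      else if e < state then bsearch fuel (mid + 1) hi state
      else bsearch fuel lo mid state

def get_token_from_ID_alt (state : Int) (lexeme : String) : String :=
  if state == 1 then (if KEYWORDS.contains lexeme then lexeme else "iden")
  else
    let i := bsearch (STATES.length + 1) 0 (STATES.length : Int) state
    if i ≥ 0 then PySem.List.pyGetD TOKS i "" else ""

-- ===== PRECONDITION & SPEC =====
def Spec_get_token_from_ID (state : Int) (lexeme : String) (out : String) : Prop := out = get_token_from_ID_alt state lexeme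
instance (state : Int) (lexeme : String) (out : String) : Decidable (Spec_get_token_from_ID state lexeme out) := by unfold Spec_get_token_from_ID; infer_instance

-- ===== CLAIM =====
def Claim_equal_get_token_from_ID : Prop := ∀ (state : Int) (lexeme : String), Dom_get_token_from_ID state lexeme → Spec_get_token_from_ID state lexeme (get_token_from_ID state lexeme)

-- ===== LEMMAS AND PROOFS =====

-- A's linear keyword scan equals a membership test on the same list.
theorem kwScan_eq_contains (lexeme : String) (l : List String) :
    kwScan lexeme l = (if l.contains lexeme then lexeme else "iden") := by
  induction l with
  | nil => simp [kwScan]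
  | cons k rest ih =>
    by_cases h : lexeme = k
    · subst h; simp [kwScan]
    · simp [kwScan, h, ih]

-- When the searched state is outside [2, 26] it is not in STATES, so every recursive
-- call of bsearch (with in-range bounds) returns -1.
theorem bsearch_notmem (x : Int) (hx : x < 2 ∨ 26 < x) :
    ∀ fuel (lo hi : Int), 0 ≤ lo → hi ≤ (STATES.length : Int) →
      bsearch fuel lo hi x = -1 := by
  intro fuel
  induction fuel with
  | zero => intro lo hi _ _; rfl
  | succ n ih =>
    intro lo hi hlo hhi
    unfold bsearch
    by_cases hge : lo ≥ hi
    · simp [hge]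
    · simp only [hge, if_false]
      have hlt : lo < hi := lt_of_not_ge hge
      have hmid := PySem.Int.floordiv_two_mid_bounds (le_of_lt hlt)
      set mid := PySem.Int.floordiv (lo + hi) 2 with hmiddef
      have hmid0 : 0 ≤ mid := le_trans hlo hmid.1
      have hmidlt : mid < (STATES.length : Int) := by
        have : mid < hi := by
          have h2 := PySem.Int.floordiv_lt_iff_lt_mul (a := lo + hi) (b := 2) (q := hi) (by omega)
          rw [← hmiddef] at h2
          exact h2.mpr (by omega)
        omega
      have hmem : PySem.List.pyGetD STATES mid 0 ∈ STATES :=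
        PySem.List.pyGetD_mem (xs := STATES) (i := mid) 0
          (by simp only [PySem.Raise.InRange]; constructor <;> omega)
      have hall : ∀ y ∈ STATES, 2 ≤ y ∧ y ≤ 26 := by decide
      have hrange := hall _ hmem
      have hne : ¬ (PySem.List.pyGetD STATES mid 0 == x) := by
        simp only [beq_iff_eq]; omega
      simp only [hne]
      by_cases hl : PySem.List.pyGetD STATES mid 0 < x
      · simp only [hl, if_true]
        exact ih (mid + 1) hi (by omega) hhi
      · simp only [hl, if_false]
        exact ih lo mid hlo (by omega)

-- ===== VERDICT =====
set_option maxHeartbeats 2000000 in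
theorem get_token_from_ID_spec : Claim_equal_get_token_from_ID := by
  intro state lexeme _
  unfold Spec_get_token_from_ID
  by_cases h1 : state = 1
  · subst h1
    unfold get_token_from_ID get_token_from_ID_alt
    simp [kwScan_eq_contains]
  · by_cases hlo : 2 ≤ state
    · by_cases hhi : state ≤ 26
      · interval_cases state <;> rfl
      · unfold get_token_from_ID get_token_from_ID_alt
        rw [bsearch_notmem state (by omega) _ 0 _ (by omega) (by omega)]
        rw [if_neg (by simp; omega), if_neg (by simp; omega), if_neg (by simp; omega), if_neg (by simp; omega), if_neg (by simp; omega), if_neg (by simp; omega), if_neg (by simp; omega), if_neg (by simp; omega), if_neg (by simp; omega), if_neg (by simp; omega), if_neg (by simp; omega), if_neg (by simp; omega), if_neg (by simp; omega), if_neg (by simp; omega), if_neg (by simp; omega)]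
        norm_num
        exact fun h => absurd h h1
    · unfold get_token_from_ID get_token_from_ID_alt
      rw [bsearch_notmem state (by omega) _ 0 _ (by omega) (by omega)]
      rw [if_neg (by simp; omega), if_neg (by simp; omega), if_neg (by simp; omega), if_neg (by simp; omega), if_neg (by simp; omega), if_neg (by simp; omega), if_neg (by simp; omega), if_neg (by simp; omega), if_neg (by simp; omega), if_neg (by simp; omega), if_neg (by simp; omega), if_neg (by simp; omega), if_neg (by simp; omega), if_neg (by simp; omega), if_neg (by simp; omega)]
      norm_num
      exact fun h => absurd h h1
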